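-- pv_equiv track=rewrite | github.com/randcap/cppcheck | uninit_case/gen_cases.py | generate_structure
-- ===== SOURCE A (Python) =====
-- def generate_structure(depth, current_depth, is_positive):
--     indent = "    " * current_depth
--     if current_depth >= depth:
--         if is_positive:
--             return f"{indent}x = 1; // Assignment at depth {depth}\n"
--         else:
--             return f"{indent}if (val == 999) x = 1; // Conditional assignment at depth {depth}\n"
--
--     structure_type = current_depth % 3
--     content = ""
--
--     if structure_type == 0: # if
--         content += f"{indent}if (val > {current_depth}) {{\n"
--         content += generate_structure(depth, current_depth + 1, is_positive)
--         content += f"{indent}}}\n"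
--     elif structure_type == 1: # for
--         content += f"{indent}for (int i{current_depth} = 0; i{current_depth} < 5; ++i{current_depth}) {{\n"
--         content += generate_structure(depth, current_depth + 1, is_positive)
--         content += f"{indent}}}\n"
--     else: # while
--         content += f"{indent}while (val < {100 + current_depth}) {{\n"
--         content += f"{indent}    val++;\n"
--         content += generate_structure(depth, current_depth + 1, is_positive)
--         content += f"{indent}}}\n"
--
--     return content
-- ===== SOURCE B (Python) =====
-- def generate_structure(depth, current_depth, is_positive):
--     pre = []
--     post = []
--     level = current_depth
--     while level < depth:
--         ind = "    " * level
--         t = level % 3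
--         if t == 0:
--             pre.append(f"{ind}if (val > {level}) {{\n")
--         elif t == 1:
--             pre.append(f"{ind}for (int i{level} = 0; i{level} < 5; ++i{level}) {{\n")
--         else:
--             pre.append(f"{ind}while (val < {100 + level}) {{\n")
--             pre.append(f"{ind}    val++;\n")
--         post.append(f"{ind}}}\n")
--         level += 1
--     ind = "    " * level
--     if is_positive:
--         base = f"{ind}x = 1; // Assignment at depth {depth}\n"
--     else:
--         base = f"{ind}if (val == 999) x = 1; // Conditional assignment at depth {depth}\n"
--     return "".join(pre) + base + "".join(reversed(post))
-- ===== Notes on version B (the rewrite author's own statement) =====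
-- stated objective: alternative
-- what changed: Replaced A's recursive build (each call wraps the inner string between its opening and closing lines) with a single iterative loop that accumulates the opening lines in order and the closing lines on a stack, then concatenates prefix + base line + reversed closers.
import Mathlib
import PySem

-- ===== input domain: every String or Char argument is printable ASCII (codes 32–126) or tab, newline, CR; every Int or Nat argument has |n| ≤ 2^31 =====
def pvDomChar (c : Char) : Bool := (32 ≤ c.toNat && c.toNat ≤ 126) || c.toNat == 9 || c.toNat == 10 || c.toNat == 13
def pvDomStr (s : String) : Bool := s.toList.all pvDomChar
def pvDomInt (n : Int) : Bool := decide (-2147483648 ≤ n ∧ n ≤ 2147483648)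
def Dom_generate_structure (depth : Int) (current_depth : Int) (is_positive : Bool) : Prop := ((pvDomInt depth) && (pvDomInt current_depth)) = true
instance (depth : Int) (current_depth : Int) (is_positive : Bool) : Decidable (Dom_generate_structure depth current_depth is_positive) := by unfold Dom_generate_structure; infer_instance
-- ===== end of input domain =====

-- B replaces A's recursion by a single loop that accumulates opening lines and a
-- stack of closing lines, then concatenates prefix ++ base line ++ reversed closers
-- (objective: simpler/alternative decomposition; same output, return value only).

-- ===== PORT A =====
-- "    " * n  (Python string repetition; empty for n ≤ 0)
def pvIndent (n : Int) : String := String.ofList (PySem.List.pyRepeat "    ".toList n)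

def generate_structure (depth : Int) (current_depth : Int) (is_positive : Bool) : String :=
  let indent := pvIndent current_depth
  if _h : current_depth ≥ depth then
    if is_positive then
      indent ++ "x = 1; // Assignment at depth " ++ PySem.Int.toStr depth ++ "\n"
    else
      indent ++ "if (val == 999) x = 1; // Conditional assignment at depth " ++ PySem.Int.toStr depth ++ "\n"
  else
    let structure_type := PySem.Int.mod current_depth 3
    if structure_type = 0 then
      indent ++ "if (val > " ++ PySem.Int.toStr current_depth ++ ") {\n"
        ++ generate_structure depth (current_depth + 1) is_positive
        ++ indent ++ "}\n"
    else if structure_type = 1 then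
      indent ++ "for (int i" ++ PySem.Int.toStr current_depth ++ " = 0; i" ++ PySem.Int.toStr current_depth
        ++ " < 5; ++i" ++ PySem.Int.toStr current_depth ++ ") {\n"
        ++ generate_structure depth (current_depth + 1) is_positive
        ++ indent ++ "}\n"
    else
      indent ++ "while (val < " ++ PySem.Int.toStr (100 + current_depth) ++ ") {\n"
        ++ indent ++ "    val++;\n"
        ++ generate_structure depth (current_depth + 1) is_positive
        ++ indent ++ "}\n"
termination_by (depth - current_depth).toNat
decreasing_by all_goals omega

-- ===== PORT B =====
-- the while loop of Source B: `level` walks up, `pre`/`post` accumulate lines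
def genLoop (depth : Int) (is_positive : Bool) (level : Int) (pre : List String) (post : List String) : String :=
  if _h : level < depth then
    let ind := pvIndent level
    let t := PySem.Int.mod level 3
    if t = 0 then
      genLoop depth is_positive (level + 1)
        (pre ++ [ind ++ "if (val > " ++ PySem.Int.toStr level ++ ") {\n"])
        (post ++ [ind ++ "}\n"])
    else if t = 1 then
      genLoop depth is_positive (level + 1)
        (pre ++ [ind ++ "for (int i" ++ PySem.Int.toStr level ++ " = 0; i" ++ PySem.Int.toStr level
          ++ " < 5; ++i" ++ PySem.Int.toStr level ++ ") {\n"])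
        (post ++ [ind ++ "}\n"])
    else
      genLoop depth is_positive (level + 1)
        (pre ++ [ind ++ "while (val < " ++ PySem.Int.toStr (100 + level) ++ ") {\n",
                 ind ++ "    val++;\n"])
        (post ++ [ind ++ "}\n"])
  else
    let ind := pvIndent level
    let base :=
      if is_positive then ind ++ "x = 1; // Assignment at depth " ++ PySem.Int.toStr depth ++ "\n"
      else ind ++ "if (val == 999) x = 1; // Conditional assignment at depth " ++ PySem.Int.toStr depth ++ "\n"
    String.join pre ++ base ++ String.join post.reverse
termination_by (depth - level).toNat
decreasing_by all_goals omega

def generate_structure_alt (depth : Int) (current_depth : Int) (is_positive : Bool) : String :=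
  genLoop depth is_positive current_depth [] []

-- ===== PRECONDITION & SPEC =====
def Spec_generate_structure (depth : Int) (current_depth : Int) (is_positive : Bool) (out : String) : Prop := out = generate_structure_alt depth current_depth is_positive
instance (depth : Int) (current_depth : Int) (is_positive : Bool) (out : String) : Decidable (Spec_generate_structure depth current_depth is_positive out) := by unfold Spec_generate_structure; infer_instance

-- ===== CLAIM (what is proved, stated in full; the proofs are below) =====
def Claim_equal_generate_structure : Prop := ∀ (depth : Int) (current_depth : Int) (is_positive : Bool), Dom_generate_structure depth current_depth is_positive → Spec_generate_structure depth current_depth is_positive (generate_structure depth current_depth is_positive)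

-- ===== LEMMAS AND PROOFS =====
theorem pv_foldl_str (l : List String) : ∀ (a : String), l.foldl (fun r s => r ++ s) a = a ++ l.foldl (fun r s => r ++ s) "" := by
  induction l with
  | nil => intro a; simp
  | cons x xs ih =>
    intro a
    simp only [List.foldl_cons]
    rw [ih (a ++ x), ih ("" ++ x)]
    simp [String.append_assoc]

theorem pv_join_nil : String.join ([] : List String) = "" := rfl

theorem pv_join_cons (x : String) (l : List String) : String.join (x :: l) = x ++ String.join l := by
  simp only [String.join, List.foldl_cons]
  rw [pv_foldl_str]
  simp

theorem pv_join_append (a b : List String) : String.join (a ++ b) = String.join a ++ String.join b := by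
  induction a with
  | nil => simp [pv_join_nil]
  | cons x xs ih => simp only [List.cons_append, pv_join_cons, ih, String.append_assoc]

theorem genLoop_eq (depth : Int) (ip : Bool) :
    ∀ (n : Nat) (level : Int), (depth - level).toNat = n →
      ∀ (pre post : List String),
        genLoop depth ip level pre post
          = String.join pre ++ generate_structure depth level ip ++ String.join post.reverse := by
  intro n
  induction n with
  | zero =>
    intro level hn pre post
    have hge : level ≥ depth := by omega
    rw [genLoop, generate_structure]
    simp only [dif_neg (by omega : ¬ level < depth), dif_pos hge]
  | succ k ih =>
    intro level hn pre post
    have hlt : level < depth := by omega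
    have hk : (depth - (level + 1)).toNat = k := by omega
    rw [genLoop, generate_structure]
    simp only [dif_pos hlt, dif_neg (by omega : ¬ level ≥ depth)]
    by_cases h0 : PySem.Int.mod level 3 = 0
    · simp only [if_pos h0, ih (level + 1) hk, List.reverse_append, List.reverse_cons,
        List.reverse_nil, List.nil_append, List.cons_append, pv_join_append, pv_join_cons, pv_join_nil]
      simp [String.append_assoc]
    · by_cases h1 : PySem.Int.mod level 3 = 1
      · simp only [if_neg h0, if_pos h1, ih (level + 1) hk, List.reverse_append, List.reverse_cons,
          List.reverse_nil, List.nil_append, List.cons_append, pv_join_append, pv_join_cons, pv_join_nil]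
        simp [String.append_assoc]
      · simp only [if_neg h0, if_neg h1, ih (level + 1) hk, List.reverse_append, List.reverse_cons,
          List.reverse_nil, List.nil_append, List.cons_append, pv_join_append, pv_join_cons, pv_join_nil]
        simp [String.append_assoc]

-- ===== VERDICT (by name: the statement is the Claim_ definition above) =====
theorem generate_structure_spec : Claim_equal_generate_structure := by
  intro depth current_depth is_positive _hd
  unfold Spec_generate_structure generate_structure_alt
  rw [genLoop_eq depth is_positive (depth - current_depth).toNat current_depth rfl]
  simp [pv_join_nil]
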